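-- pv_equiv track=rewrite | github.com/russhustle/leetpattern | src/1400_construct_k_palindrome_strings.py | canConstructCounter
-- ===== SOURCE A (Python) =====
-- from collections import Counter
--
-- def canConstructCounter(s: str, k: int) -> bool:
--     if len(s) < k:
--         return False
--
--     counts = Counter(s)
--     odd = 0
--
--     for c in counts.values():
--         odd += c % 2
--
--     return odd <= k
-- ===== SOURCE B (Python) =====
-- def odd_parities(t):
--     if not t:
--         return 0
--     c = t[0]
--     return t.count(c) % 2 + odd_parities([x for x in t if x != c])
--
-- def canConstructCounter(s: str, k: int) -> bool:
--     if len(s) < k: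
--         return False
--     return odd_parities(list(s)) <= k
-- ===== Notes on version B (the rewrite author's own statement) =====
-- stated objective: alternative
-- what changed: Replaces the Counter-then-sum-odd-counts loop with a recursive decomposition that repeatedly takes the first character, adds the parity of its total count, and recurses on the list with all its occurrences stripped out.
import Mathlib
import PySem

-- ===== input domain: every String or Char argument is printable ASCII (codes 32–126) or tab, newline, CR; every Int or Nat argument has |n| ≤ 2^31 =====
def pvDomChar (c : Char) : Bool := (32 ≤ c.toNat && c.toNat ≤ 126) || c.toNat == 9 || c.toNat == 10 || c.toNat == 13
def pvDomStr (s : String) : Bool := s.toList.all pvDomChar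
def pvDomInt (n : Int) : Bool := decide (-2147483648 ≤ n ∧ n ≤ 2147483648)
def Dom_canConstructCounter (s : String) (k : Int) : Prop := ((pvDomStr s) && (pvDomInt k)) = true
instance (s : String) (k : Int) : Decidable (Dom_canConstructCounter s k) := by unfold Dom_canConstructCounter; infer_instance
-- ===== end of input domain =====

-- B replaces the Counter-then-sum-odd-counts loop by a recursion that strips one
-- distinct character per step, summing count parities (objective: alternative).

-- ===== PORT A =====
def canConstructCounter (s : String) (k : Int) : Bool :=
  if PySem.Str.len s < k then false
  else
    let counts := PySem.Dict.counter s.toList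
    let odd := counts.values.foldl (fun acc c => acc + PySem.Int.mod c 2) (0 : Int)
    decide (odd ≤ k)

-- ===== PORT B =====
-- helper odd_parities of Source B: parity of the first character's count, plus a
-- recursive call on the list with every occurrence of that character removed
def pvOddParities (l : List Char) : Int :=
  match l with
  | [] => 0
  | c :: t =>
      PySem.Int.mod (PySem.List.count (c :: t) c) 2
        + pvOddParities ((c :: t).filter (fun x => decide (x ≠ c)))
termination_by l.length
decreasing_by
  simp only [List.filter_cons, ne_eq, not_true_eq_false, decide_false]
  exact Nat.lt_succ_of_le (List.length_filter_le _ _)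

def canConstructCounter_alt (s : String) (k : Int) : Bool :=
  if PySem.Str.len s < k then false
  else decide (pvOddParities s.toList ≤ k)

-- ===== PRECONDITION & SPEC =====
def Spec_canConstructCounter (s : String) (k : Int) (out : Bool) : Prop := out = canConstructCounter_alt s k
instance (s : String) (k : Int) (out : Bool) : Decidable (Spec_canConstructCounter s k out) := by unfold Spec_canConstructCounter; infer_instance

-- ===== CLAIM (what is proved, stated in full; the proofs are below) =====
def Claim_equal_canConstructCounter : Prop := ∀ (s : String) (k : Int), Dom_canConstructCounter s k → Spec_canConstructCounter s k (canConstructCounter s k)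

-- ===== LEMMAS AND PROOFS =====

-- A's odd-sum equals the parity sum over the distinct characters
theorem pvOddA (l : List Char) :
    (PySem.Dict.counter l).values.foldl (fun acc c => acc + PySem.Int.mod c 2) (0 : Int)
      = ((PySem.Set.ofList l).map (fun c => ((l.count c % 2 : Nat) : Int))).sum := by
  have hv : (PySem.Dict.counter l).values
      = (PySem.Set.ofList l).map (fun k => ((l.count k : Nat) : Int)) := by
    simp [PySem.Dict.values, PySem.Dict.items_counter]
  rw [hv, PySem.List.foldl_add]
  simp only [List.map_map, Function.comp_def, zero_add]
  congr 1
  apply List.map_congr_left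
  intro c _
  rw [PySem.Int.mod_eq_emod_of_pos (by norm_num)]
  omega

-- counts of a character other than c are unchanged by stripping the c's
theorem pvCount_filter (t : List Char) (c x : Char) (hx : x ≠ c) :
    (t.filter (fun y => decide (y ≠ c))).count x = t.count x := by
  induction t with
  | nil => rfl
  | cons a t ih =>
    by_cases hac : a = c
    · subst hac
      have h1 : (a :: t).filter (fun y => decide (y ≠ a)) = t.filter (fun y => decide (y ≠ a)) := by
        simp
      rw [h1, ih, List.count_cons]
      simp [beq_iff_eq]
      exact Ne.symm hx
    · have h1 : (a :: t).filter (fun y => decide (y ≠ c)) = a :: t.filter (fun y => decide (y ≠ c)) := by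
        simp [hac]
      rw [h1, List.count_cons, List.count_cons, ih]

-- the recursive call's parity sum equals the tail part of the distinct-character sum
theorem pvTail (c : Char) (t : List Char) :
    ((PySem.Set.ofList (t.filter (fun x => decide (x ≠ c)))).map
        (fun x => (((t.filter (fun x => decide (x ≠ c))).count x % 2 : Nat) : Int))).sum
      = ((PySem.Set.discard (PySem.Set.ofList t) c).map
        (fun x => (((c :: t).count x % 2 : Nat) : Int))).sum := by
  have hmem : ∀ x, x ∈ PySem.Set.ofList (t.filter (fun x => decide (x ≠ c)))
      ↔ x ∈ PySem.Set.discard (PySem.Set.ofList t) c := by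
    intro x
    simp [PySem.Set.mem_ofList, PySem.Set.mem_discard, List.mem_filter, and_comm]
  have hperm : (PySem.Set.ofList (t.filter (fun x => decide (x ≠ c)))).Perm
      (PySem.Set.discard (PySem.Set.ofList t) c) := by
    rw [List.perm_ext_iff_of_nodup (PySem.Set.nodup_ofList _)
      (PySem.Set.nodup_discard _ _ (PySem.Set.nodup_ofList _))]
    exact hmem
  have h1 : ((PySem.Set.ofList (t.filter (fun x => decide (x ≠ c)))).map
        (fun x => (((t.filter (fun x => decide (x ≠ c))).count x % 2 : Nat) : Int)))
      = ((PySem.Set.ofList (t.filter (fun x => decide (x ≠ c)))).map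
        (fun x => ((t.count x % 2 : Nat) : Int))) := by
    apply List.map_congr_left
    intro x hxm
    have hx : x ≠ c := by
      have hxt := (PySem.Set.mem_ofList _ _).mp hxm
      simp only [List.mem_filter, decide_eq_true_eq] at hxt
      exact hxt.2
    rw [pvCount_filter t c x hx]
  have h2 : ((PySem.Set.discard (PySem.Set.ofList t) c).map
        (fun x => (((c :: t).count x % 2 : Nat) : Int)))
      = ((PySem.Set.discard (PySem.Set.ofList t) c).map
        (fun x => ((t.count x % 2 : Nat) : Int))) := by
    apply List.map_congr_left
    intro x hxm
    have hx : x ≠ c := ((PySem.Set.mem_discard _ _ _).mp hxm).2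
    have hcx : ¬ c = x := fun h => hx h.symm
    simp [hcx]
  rw [h1, h2]
  exact (hperm.map _).sum_eq

-- B's recursion computes the same parity sum
theorem pvOddB (l : List Char) :
    pvOddParities l = ((PySem.Set.ofList l).map (fun c => ((l.count c % 2 : Nat) : Int))).sum := by
  induction l using pvOddParities.induct with
  | case1 => simp [pvOddParities]
  | case2 c t ih =>
    rw [pvOddParities]
    have hf : (c :: t).filter (fun x => decide (x ≠ c)) = t.filter (fun x => decide (x ≠ c)) := by
      simp
    rw [hf] at ih ⊢
    rw [ih, PySem.Set.ofList_cons, List.map_cons, List.sum_cons, pvTail]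
    congr 1
    simp only [PySem.List.count]
    rw [PySem.Int.mod_eq_emod_of_pos (by norm_num)]
    omega

-- ===== VERDICT (by name: the statement is the Claim_ definition above) =====
theorem canConstructCounter_spec : Claim_equal_canConstructCounter := by
  intro s k _
  unfold Spec_canConstructCounter canConstructCounter canConstructCounter_alt
  simp only [pvOddA, pvOddB]
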